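-- pv_equiv track=rewrite | github.com/aldemirfilho/Lista-3-PAA | 3.5.py | busca_binaria_recursiva_i
-- ===== SOURCE A (Python) =====
-- def busca_binaria_recursiva_i(A, esquerda, direita):
--     if direita < esquerda:
--         return -1
--     i = (esquerda + direita) // 2
--     if A[i] == i:
--         return i
--     elif A[i] > i:
--         return busca_binaria_recursiva_i(A, esquerda, i - 1)
--     else:
--         return busca_binaria_recursiva_i(A, i + 1, direita)
-- ===== SOURCE B (Python) =====
-- def _probe(A, lo, hi):
--     """One binary-search probe: returns (result_or_None, new_lo, new_hi)."""
--     mid = lo + (hi - lo) // 2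
--     diff = A[mid] - mid
--     if diff > 0:
--         return None, lo, mid - 1
--     if diff < 0:
--         return None, mid + 1, hi
--     return mid, lo, hi
--
--
-- def busca_binaria_recursiva_i(A, esquerda, direita):
--     lo, hi = esquerda, direita
--     while lo <= hi:
--         res, lo, hi = _probe(A, lo, hi)
--         if res is not None:
--             return res
--     return -1
-- ===== Notes on version B (the rewrite author's own statement) =====
-- stated objective: alternative
-- what changed: The tail recursion is replaced by a probe step-function (computing the overflow-safe midpoint lo+(hi-lo)//2 and branching on the sign of A[mid]-mid) driven by an iterative while-loop over the bounds, instead of A's self-recursive compare-and-recurse.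
-- outside the precondition, e.g. on busca_binaria_recursiva_i([-1], -5, 3): A returns -1, B returns -1; on busca_binaria_recursiva_i([5], 0, 5): A raises IndexError, B raises IndexError
import Mathlib
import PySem

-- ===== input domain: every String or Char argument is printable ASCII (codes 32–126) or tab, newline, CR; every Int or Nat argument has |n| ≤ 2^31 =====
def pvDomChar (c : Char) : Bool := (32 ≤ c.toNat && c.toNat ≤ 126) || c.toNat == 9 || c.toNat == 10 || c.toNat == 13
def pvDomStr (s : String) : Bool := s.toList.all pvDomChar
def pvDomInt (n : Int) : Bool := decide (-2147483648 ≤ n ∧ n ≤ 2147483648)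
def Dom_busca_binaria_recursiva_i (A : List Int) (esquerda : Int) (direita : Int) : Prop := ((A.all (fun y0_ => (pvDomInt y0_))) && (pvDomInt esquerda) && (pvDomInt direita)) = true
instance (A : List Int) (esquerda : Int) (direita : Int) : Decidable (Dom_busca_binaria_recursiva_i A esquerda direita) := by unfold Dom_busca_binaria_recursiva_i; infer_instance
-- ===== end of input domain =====

-- B replaces the tail recursion by a probe step-function (midpoint lo+(hi-lo)//2, sign of A[mid]-mid) driven by a while-loop; same probes, same values.

-- ===== PORT A =====
-- Literal port of A's recursion; the fuel argument is only a totality guard: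
-- (direita-esquerda+1).toNat steps always suffice, since the interval shrinks
-- by at least one each call. A[i] is Python indexing (negative wrap); the
-- `none` case (Python IndexError) is excluded by Pre_ below.
def buscaRec (A : List Int) : Nat → Int → Int → Int
  | 0, _, _ => -1
  | fuel + 1, esquerda, direita =>
    if direita < esquerda then -1
    else
      let i := PySem.Int.floordiv (esquerda + direita) 2
      match PySem.List.pyGet? A i with
      | none => 0
      | some v =>
        if v = i then i
        else if v > i then buscaRec A fuel esquerda (i - 1)
        else buscaRec A fuel (i + 1) direita

def busca_binaria_recursiva_i (A : List Int) (esquerda : Int) (direita : Int) : Int :=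
  buscaRec A (direita - esquerda + 1).toNat esquerda direita

-- ===== PORT B =====
-- Source B's `_probe`: one probe, returning (result-or-None, new_lo, new_hi).
-- The `none` arm of pyGet? (Python IndexError) is excluded by Pre_ below.
def bbProbe (A : List Int) (lo hi : Int) : Option Int × Int × Int :=
  let mid := lo + PySem.Int.floordiv (hi - lo) 2
  match PySem.List.pyGet? A mid with
  | none => (some 0, lo, hi)
  | some v =>
    let diff := v - mid
    if diff > 0 then (none, lo, mid - 1)
    else if diff < 0 then (none, mid + 1, hi)
    else (some mid, lo, hi)

-- Source B's while-loop: the two mutable bounds are the state threaded through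
-- `bbLoop`; the fuel argument is only a totality guard ((hi-lo+1).toNat
-- iterations always suffice, the probe shrinks the interval each time).
def bbLoop (A : List Int) : Nat → Int → Int → Int
  | 0, _, _ => -1
  | fuel + 1, lo, hi =>
    if lo ≤ hi then
      match bbProbe A lo hi with
      | (some r, _, _) => r
      | (none, lo', hi') => bbLoop A fuel lo' hi'
    else -1

def busca_binaria_recursiva_i_alt (A : List Int) (esquerda : Int) (direita : Int) : Int :=
  bbLoop A (direita - esquerda + 1).toNat esquerda direita

-- ===== PRECONDITION & SPEC =====
-- Pre_ excludes bound pairs whose probed midpoints can leave Python's index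
-- range [-len, len): there A can raise IndexError (and B raises identically).
def Pre_busca_binaria_recursiva_i (A : List Int) (esquerda : Int) (direita : Int) : Prop :=
  direita < esquerda ∨ (-(A.length : Int) ≤ esquerda ∧ direita < (A.length : Int))
instance (A : List Int) (esquerda : Int) (direita : Int) : Decidable (Pre_busca_binaria_recursiva_i A esquerda direita) := by unfold Pre_busca_binaria_recursiva_i; infer_instance

def pvWitness_busca_binaria_recursiva_i : List Int × Int × Int := ([-3, 0, 2, 2, 4], 0, 4)

def Spec_busca_binaria_recursiva_i (A : List Int) (esquerda : Int) (direita : Int) (out : Int) : Prop := out = busca_binaria_recursiva_i_alt A esquerda direita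
instance (A : List Int) (esquerda : Int) (direita : Int) (out : Int) : Decidable (Spec_busca_binaria_recursiva_i A esquerda direita out) := by unfold Spec_busca_binaria_recursiva_i; infer_instance

-- ===== CLAIM (what is proved, stated in full; the proofs are below) =====
def Claim_equal_busca_binaria_recursiva_i : Prop := ∀ (A : List Int) (esquerda : Int) (direita : Int), Dom_busca_binaria_recursiva_i A esquerda direita → Pre_busca_binaria_recursiva_i A esquerda direita → Spec_busca_binaria_recursiva_i A esquerda direita (busca_binaria_recursiva_i A esquerda direita)

-- ===== LEMMAS AND PROOFS =====

-- the two midpoint formulas agree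
theorem mid_eq (lo hi : Int) :
    lo + PySem.Int.floordiv (hi - lo) 2 = PySem.Int.floordiv (lo + hi) 2 := by
  rw [PySem.Int.floordiv_eq_ediv_of_pos (by omega), PySem.Int.floordiv_eq_ediv_of_pos (by omega)]
  omega

-- with the same fuel, A's recursion and B's probe-driven loop step in lockstep
theorem buscaRec_eq_bbLoop (A : List Int) :
    ∀ (fuel : Nat) (e d : Int), buscaRec A fuel e d = bbLoop A fuel e d := by
  intro fuel
  induction fuel with
  | zero => intro e d; rfl
  | succ f ih =>
    intro e d
    by_cases hlt : d < e
    · simp [buscaRec, bbLoop, hlt, show ¬ e ≤ d by omega]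
    · rw [buscaRec, bbLoop]
      rw [if_neg hlt, if_pos (show e ≤ d by omega)]
      simp only [bbProbe, mid_eq e d]
      rcases hget : PySem.List.pyGet? A (PySem.Int.floordiv (e + d) 2) with _ | v
      · rfl
      · by_cases h0 : v = (e + d) / 2
        · simp [h0]
        · by_cases hgt : (e + d) / 2 < v
          · simp [h0, hgt, ih]
          · simp [h0, hgt, show v < (e + d) / 2 by omega, ih]

-- ===== VERDICT (by name: the statement is the Claim_ definition above) =====
theorem busca_binaria_recursiva_i_spec : Claim_equal_busca_binaria_recursiva_i := by
  intro A e d _ _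
  unfold Spec_busca_binaria_recursiva_i busca_binaria_recursiva_i_alt busca_binaria_recursiva_i
  exact buscaRec_eq_bbLoop A (d - e + 1).toNat e d
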